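-- pv_equiv track=rewrite | github.com/IkennaIkwuka/SideProjects | py_calculatorApp/src/cli/main.py | check_operand
-- ===== SOURCE A (Python) =====
-- def check_operand(operand: str):
--     if operand.isdigit():
--         return True
--
--     if operand == "/":
--         return False  # ---fix for duplicate last value error---
--
--     inner_sep = {".", "%", "^", "/"}
--
--     for sep in inner_sep:
--         if sep == operand:
--             return False
--         if sep in operand:
--             left, right = operand.split(sep, 1)
--             if left.isdigit() and right.isdigit():
--                 return True
--             return False
--         continue
--     return False
-- ===== SOURCE B (Python) =====
-- def check_operand(operand: str):
--     if operand.isdigit():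
--         return True
--     seps = [c for c in operand if c in ".%^/"]
--     if len(seps) != 1:
--         return False
--     left, _, right = operand.partition(seps[0])
--     return left.isdigit() and right.isdigit()
-- ===== Notes on version B (the rewrite author's own statement) =====
-- stated objective: simpler
-- what changed: Replaces the early slash special case and the loop over the separator set (a membership scan and split per separator) by one pass collecting all separator characters: unless exactly one is found return False, otherwise partition on it and test both sides with isdigit.
import Mathlib
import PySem

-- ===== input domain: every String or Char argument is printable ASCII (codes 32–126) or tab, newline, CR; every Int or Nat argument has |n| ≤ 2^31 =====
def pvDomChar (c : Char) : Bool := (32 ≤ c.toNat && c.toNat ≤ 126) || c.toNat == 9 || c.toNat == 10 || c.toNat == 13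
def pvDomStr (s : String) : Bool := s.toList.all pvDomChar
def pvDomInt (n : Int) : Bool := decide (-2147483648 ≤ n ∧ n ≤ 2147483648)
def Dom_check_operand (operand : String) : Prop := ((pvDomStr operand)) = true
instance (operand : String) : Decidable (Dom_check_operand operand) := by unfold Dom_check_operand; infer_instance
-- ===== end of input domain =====

-- B replaces A's loop over the separator set by a single pass collecting separator characters (simpler, one pass).

-- ===== PORT A =====
-- the for-loop over the set {".", "%", "^", "/"}, iterated in CPython's observed order ['.', '/', '%', '^']
def checkLoopA (operand : String) : List String → Bool
  | [] => false
  | sep :: rest =>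
    if sep == operand then false
    else if PySem.Str.isIn sep operand then
      -- left, right = operand.split(sep, 1); sep ∈ operand guarantees exactly two pieces
      match PySem.Str.splitMax? operand sep 1 with
      | some [l, r] => PySem.Str.strIsdigit l && PySem.Str.strIsdigit r
      | _ => false
    else checkLoopA operand rest

def check_operand (operand : String) : Bool :=
  if PySem.Str.strIsdigit operand then true
  else if operand == "/" then false
  else checkLoopA operand [".", "/", "%", "^"]

-- ===== PORT B =====
def check_operand_alt (operand : String) : Bool :=
  if PySem.Str.strIsdigit operand then true
  else
    match operand.toList.filter (fun c => ['.', '%', '^', '/'].contains c) with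
    | [c] =>
      -- operand.partition(seps[0]): split at the first occurrence of c (exact: c ∈ operand)
      PySem.Chars.strIsdigit (operand.toList.takeWhile (· != c)) &&
      PySem.Chars.strIsdigit ((operand.toList.dropWhile (· != c)).tail)
    | _ => false

-- ===== PRECONDITION & SPEC =====
def Spec_check_operand (operand : String) (out : Bool) : Prop := out = check_operand_alt operand
instance (operand : String) (out : Bool) : Decidable (Spec_check_operand operand out) := by unfold Spec_check_operand; infer_instance

-- ===== CLAIM (what is proved, stated in full; the proofs are below) =====
def Claim_equal_check_operand : Prop := ∀ (operand : String), Dom_check_operand operand → Spec_check_operand operand (check_operand operand)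

-- ===== LEMMAS AND PROOFS =====

def sp (c : Char) : Bool := ['.', '%', '^', '/'].contains c

theorem go_zero (c : Char) (f : Nat) (l cur : List Char) (acc : List (List Char)) :
    PySem.Chars.splitOnMax.go [c] f 0 l cur acc = ((cur.reverse ++ l) :: acc).reverse := by
  cases f <;> cases l <;> simp [PySem.Chars.splitOnMax.go]

theorem go_one (c : Char) : ∀ (l : List Char) (f : Nat) (cur : List Char) (acc : List (List Char)),
    c ∈ l → l.length < f →
    PySem.Chars.splitOnMax.go [c] f 1 l cur acc
      = (((l.dropWhile (· != c)).tail) :: (cur.reverse ++ l.takeWhile (· != c)) :: acc).reverse := by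
  intro l
  induction l with
  | nil => intro f cur acc hmem _; simp at hmem
  | cons d rest ih =>
    intro f cur acc hmem hf
    cases f with
    | zero => omega
    | succ f =>
      by_cases hdc : d = c
      · subst hdc
        simp [PySem.Chars.splitOnMax.go, List.isPrefixOf, go_zero]
      · have hmem' : c ∈ rest := by
          rcases List.mem_cons.mp hmem with h | h
          · exact absurd h.symm hdc
          · exact h
        have : PySem.Chars.splitOnMax.go [c] (f+1) 1 (d :: rest) cur acc
            = PySem.Chars.splitOnMax.go [c] f 1 rest (d :: cur) acc := by
          simp [PySem.Chars.splitOnMax.go, List.isPrefixOf, Ne.symm hdc]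
        rw [this, ih f (d :: cur) acc hmem' (by simpa using Nat.lt_of_succ_lt_succ hf)]
        simp [hdc]

theorem splitMax_char (c : Char) (l : List Char) (h : c ∈ l) :
    PySem.Chars.splitMax? l [c] 1
      = some [l.takeWhile (· != c), (l.dropWhile (· != c)).tail] := by
  have h1 : PySem.Chars.splitMax? l [c] 1
      = some (PySem.Chars.splitOnMax.go [c] (l.length + 1) 1 l [] []) := by
    simp [PySem.Chars.splitMax?, PySem.Chars.splitOnMax]
  rw [h1, go_one c l (l.length + 1) [] [] h (Nat.lt_succ_self _)]
  simp

theorem strSplit_eq (s sep : String) (T R : List Char)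
    (h : PySem.Chars.splitMax? s.toList sep.toList 1 = some [T, R]) :
    PySem.Str.splitMax? s sep 1 = some [String.ofList T, String.ofList R] := by
  have hm := PySem.Str.splitMax?_map s sep 1
  rw [h] at hm
  cases he : PySem.Str.splitMax? s sep 1 with
  | none => rw [he] at hm; simp at hm
  | some xs =>
    rw [he] at hm
    simp only [Option.map_some, Option.some.injEq] at hm
    match xs, hm with
    | [x, y], hm =>
      simp only [List.map_cons, List.map_nil, List.cons.injEq, and_true] at hm
      obtain ⟨hx, hy⟩ := hm
      have hx' : x = String.ofList T := String.toList_inj.mp (by simp [hx])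
      have hy' : y = String.ofList R := String.toList_inj.mp (by simp [hy])
      rw [hx', hy']

theorem notdig (d : Char) (hd : sp d = true) (l : List Char) (h : d ∈ l) :
    PySem.Chars.strIsdigit l = false := by
  have hdig : PySem.Chars.isdigit d = false := by
    simp [sp] at hd
    rcases hd with h | h | h | h <;> subst h <;> decide
  simp [PySem.Chars.strIsdigit]
  intro _
  exact ⟨d, h, by simp [hdig]⟩

theorem decomp (c : Char) (l : List Char) (h : c ∈ l) :
    l.takeWhile (· != c) ++ c :: (l.dropWhile (· != c)).tail = l := by
  induction l with
  | nil => simp at h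
  | cons d rest ih =>
    by_cases hdc : d = c
    · subst hdc; simp
    · have h' : c ∈ rest := by
        rcases List.mem_cons.mp h with h | h
        · exact absurd h.symm hdc
        · exact h
      simp only [List.takeWhile_cons, List.dropWhile_cons]
      rw [if_pos (by simp [hdc]), if_pos (by simp [hdc])]
      simp [ih h']

theorem split_false (c : Char) (l : List Char) (hc : c ∈ l) (hsp : sp c = true)
    (h2 : 2 ≤ (l.filter sp).length) :
    (PySem.Chars.strIsdigit (l.takeWhile (· != c)) &&
     PySem.Chars.strIsdigit ((l.dropWhile (· != c)).tail)) = false := by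
  have hdec := decomp c l hc
  have hfil : l.filter sp
      = (l.takeWhile (· != c)).filter sp ++ c :: ((l.dropWhile (· != c)).tail).filter sp := by
    conv_lhs => rw [← hdec]
    simp [List.filter_append, hsp]
  rw [hfil] at h2
  simp only [List.length_append, List.length_cons] at h2
  have : 1 ≤ ((l.takeWhile (· != c)).filter sp).length + (((l.dropWhile (· != c)).tail).filter sp).length := by omega
  rcases Nat.lt_or_ge 0 ((l.takeWhile (· != c)).filter sp).length with h | h
  · obtain ⟨d, hd⟩ := List.exists_mem_of_length_pos h
    have hmem := List.mem_filter.mp hd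
    rw [notdig d hmem.2 _ hmem.1]
    simp
  · have : 0 < (((l.dropWhile (· != c)).tail).filter sp).length := by omega
    obtain ⟨d, hd⟩ := List.exists_mem_of_length_pos this
    have hmem := List.mem_filter.mp hd
    rw [notdig d hmem.2 _ hmem.1]
    simp

theorem loop_skip (operand s : String) (d : Char) (hs : s.toList = [d])
    (hmem : d ∉ operand.toList) (rest : List String) :
    checkLoopA operand (s :: rest) = checkLoopA operand rest := by
  have h1 : s ≠ operand := by
    intro h; subst h; exact hmem (by simp [hs])
  have h2 : PySem.Chars.isIn s.toList operand.toList = false := by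
    rw [hs, PySem.Chars.isIn_eq_false_iff, List.singleton_infix_iff]
    exact hmem
  simp [checkLoopA, h1, h2]

theorem loop_hit (operand s : String) (d : Char) (hs : s.toList = [d])
    (hd : d ∈ operand.toList) (hne : operand.toList ≠ [d]) (rest : List String) :
    checkLoopA operand (s :: rest)
      = (PySem.Chars.strIsdigit (operand.toList.takeWhile (· != d)) &&
         PySem.Chars.strIsdigit ((operand.toList.dropWhile (· != d)).tail)) := by
  have h1 : s ≠ operand := by
    intro h; subst h; exact hne hs
  have h2 : PySem.Chars.isIn s.toList operand.toList = true := by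
    rw [hs, PySem.Chars.isIn_iff_infix, List.singleton_infix_iff]
    exact hd
  have h3 := strSplit_eq operand s _ _ (by rw [hs]; exact splitMax_char d operand.toList hd)
  simp [checkLoopA, h1, h2, h3, PySem.Str.strIsdigit_eq]

theorem loop_step_false (operand s : String) (d : Char) (hs : s.toList = [d]) (hd : sp d = true)
    (h2 : 2 ≤ (operand.toList.filter sp).length) (rest : List String)
    (ih : checkLoopA operand rest = false) :
    checkLoopA operand (s :: rest) = false := by
  by_cases hm : d ∈ operand.toList
  · have hne : operand.toList ≠ [d] := by
      intro h; rw [h] at h2; simp [hd] at h2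
    rw [loop_hit operand s d hs hm hne]
    exact split_false d operand.toList hm hd h2
  · rw [loop_skip operand s d hs hm]; exact ih

theorem loop_self (operand s : String) (hso : s = operand) (rest : List String) :
    checkLoopA operand (s :: rest) = false := by
  simp [checkLoopA, hso]

theorem check_operand_spec : Claim_equal_check_operand := by
  intro operand _
  unfold Spec_check_operand check_operand check_operand_alt
  by_cases hslash : operand = "/"
  · subst hslash; decide
  · by_cases hd : PySem.Str.strIsdigit operand = true
    · rw [if_pos hd, if_pos hd]
    · rw [if_neg hd, if_neg hd, if_neg (by simp [hslash] : ¬(operand == "/") = true)]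
      have hsp : operand.toList.filter (fun c => ['.', '%', '^', '/'].contains c)
          = operand.toList.filter sp := rfl
      rw [hsp]
      cases hfil : operand.toList.filter sp with
      | nil =>
        show checkLoopA operand [".", "/", "%", "^"] = false
        have hnone : ∀ d, sp d = true → d ∉ operand.toList := by
          intro d hsd hmem
          have : d ∈ operand.toList.filter sp := List.mem_filter.mpr ⟨hmem, hsd⟩
          rw [hfil] at this; simp at this
        rw [loop_skip operand "." '.' rfl (hnone '.' rfl) _,
            loop_skip operand "/" '/' rfl (hnone '/' rfl) _,
            loop_skip operand "%" '%' rfl (hnone '%' rfl) _,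
            loop_skip operand "^" '^' rfl (hnone '^' rfl) _]
        simp [checkLoopA]
      | cons c t =>
        cases t with
        | nil =>
          show checkLoopA operand [".", "/", "%", "^"]
              = (PySem.Chars.strIsdigit (operand.toList.takeWhile (· != c)) &&
                 PySem.Chars.strIsdigit ((operand.toList.dropWhile (· != c)).tail))
          have hcmem : c ∈ operand.toList ∧ sp c = true := by
            have : c ∈ operand.toList.filter sp := by rw [hfil]; simp
            exact ⟨(List.mem_filter.mp this).1, (List.mem_filter.mp this).2⟩
          have huniq : ∀ d, sp d = true → d ∈ operand.toList → d = c := by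
            intro d h1 h2
            have : d ∈ operand.toList.filter sp := List.mem_filter.mpr ⟨h2, h1⟩
            rw [hfil] at this; simpa using this
          have hskip : ∀ d, d ≠ c → sp d = true → d ∉ operand.toList := by
            intro d hne hsd hmem; exact hne (huniq d hsd hmem)
          by_cases hone : operand.toList = [c]
          · -- operand IS the separator: A returns False at `sep == operand`, B's sides are empty
            have hAone : ∀ (s : String) (rest : List String), s.toList = [c] →
                checkLoopA operand (s :: rest) = false := by
              intro s rest hs
              exact loop_self operand s (String.toList_inj.mp (by rw [hs, hone])) rest
            have hsp4 : c = '.' ∨ c = '%' ∨ c = '^' ∨ c = '/' := by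
              have := hcmem.2; simp [sp] at this; tauto
            rcases hsp4 with h | h | h | h <;> subst h
            · rw [hAone "." _ rfl]; simp [hone, PySem.Chars.strIsdigit]
            · rw [loop_skip operand "." '.' rfl (hskip '.' (by decide) rfl) _,
                  loop_skip operand "/" '/' rfl (hskip '/' (by decide) rfl) _,
                  hAone "%" _ rfl]
              simp [hone, PySem.Chars.strIsdigit]
            · rw [loop_skip operand "." '.' rfl (hskip '.' (by decide) rfl) _,
                  loop_skip operand "/" '/' rfl (hskip '/' (by decide) rfl) _,
                  loop_skip operand "%" '%' rfl (hskip '%' (by decide) rfl) _,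
                  hAone "^" _ rfl]
              simp [hone, PySem.Chars.strIsdigit]
            · exact absurd (String.toList_inj.mp hone) hslash
          · have hsp4 : c = '.' ∨ c = '%' ∨ c = '^' ∨ c = '/' := by
              have := hcmem.2; simp [sp] at this; tauto
            rcases hsp4 with h | h | h | h <;> subst h
            · rw [loop_hit operand "." '.' rfl hcmem.1 hone]
            · rw [loop_skip operand "." '.' rfl (hskip '.' (by decide) rfl) _,
                  loop_skip operand "/" '/' rfl (hskip '/' (by decide) rfl) _,
                  loop_hit operand "%" '%' rfl hcmem.1 hone]
            · rw [loop_skip operand "." '.' rfl (hskip '.' (by decide) rfl) _,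
                  loop_skip operand "/" '/' rfl (hskip '/' (by decide) rfl) _,
                  loop_skip operand "%" '%' rfl (hskip '%' (by decide) rfl) _,
                  loop_hit operand "^" '^' rfl hcmem.1 hone]
            · rw [loop_skip operand "." '.' rfl (hskip '.' (by decide) rfl) _,
                  loop_hit operand "/" '/' rfl hcmem.1 hone]
        | cons b t' =>
          show checkLoopA operand [".", "/", "%", "^"] = false
          have h2 : 2 ≤ (operand.toList.filter sp).length := by
            rw [hfil]; simp
          rw [loop_step_false operand "." '.' rfl (by decide) h2 _
                (loop_step_false operand "/" '/' rfl (by decide) h2 _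
                  (loop_step_false operand "%" '%' rfl (by decide) h2 _
                    (loop_step_false operand "^" '^' rfl (by decide) h2 _
                      (by simp [checkLoopA]))))]
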